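-- pv_equiv track=rewrite | github.com/Fondamenti18/fondamenti-di-programmazione | students/1754617/homework02/program03.py | ritornaIndiciDuplicati
-- ===== SOURCE A (Python) =====
-- def ritornaIndiciDuplicati(parola):
--     lista=[]
--     for x in range(len(parola)-1,0,-1):
--         for y in range(x):
--             if(parola[x]==parola[y]):
--                 lista.append(x)
--                 lista.append(y)
--     return (lista)
-- ===== SOURCE B (Python) =====
-- def ritornaIndiciDuplicati(parola):
--     # group indices by character, then emit pairs x (descending), y (ascending earlier same-char index)
--     pos = {}
--     for i, c in enumerate(parola):
--         pos.setdefault(c, []).append(i)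
--     lista = []
--     for x in range(len(parola) - 1, 0, -1):
--         for y in pos[parola[x]]:
--             if y >= x:
--                 break
--             lista.append(x)
--             lista.append(y)
--     return lista
-- ===== Notes on version B (the rewrite author's own statement) =====
-- stated objective: alternative
-- what changed: Replaces the all-pairs index scan by one pass that groups indices per character in a dict, then for each x descending emits the earlier same-character indices directly (breaking at x); intended as output-sensitive, but on duplicate-heavy inputs the output itself is quadratic so a timing run read only 1.71x at the largest completed size.
import Mathlib
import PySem

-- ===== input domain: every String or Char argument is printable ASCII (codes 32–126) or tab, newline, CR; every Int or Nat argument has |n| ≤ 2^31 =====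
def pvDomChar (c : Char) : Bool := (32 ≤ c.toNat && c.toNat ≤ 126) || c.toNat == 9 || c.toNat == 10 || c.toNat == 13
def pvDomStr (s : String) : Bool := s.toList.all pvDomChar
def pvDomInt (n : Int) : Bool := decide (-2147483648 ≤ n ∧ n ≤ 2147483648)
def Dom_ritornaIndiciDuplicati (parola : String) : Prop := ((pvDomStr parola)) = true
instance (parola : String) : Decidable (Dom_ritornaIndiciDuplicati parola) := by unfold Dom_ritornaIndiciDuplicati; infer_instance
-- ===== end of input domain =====

-- B groups the indices by character in one dict pass and, for each x descending, emits the
-- earlier same-character indices directly (stopping at x) instead of A's all-pairs scan.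

-- ===== PORT A =====
def ritornaIndiciDuplicati (parola : String) : List Int :=
  let cs := parola.toList
  let n : Int := cs.length
  (PySem.List.pyRange (n - 1) 0 (-1)).foldl (fun lista x =>
    (PySem.List.pyRange 0 x 1).foldl (fun lista y =>
      if PySem.List.pyGetD cs x ' ' == PySem.List.pyGetD cs y ' ' then
        lista ++ [x, y]
      else lista) lista) []

-- ===== PORT B =====
def ritornaIndiciDuplicati_alt (parola : String) : List Int :=
  let cs := parola.toList
  let n : Int := cs.length
  -- pos: char -> ascending list of its indices (setdefault(c, []).append(i) = modify c [] (· ++ [i]))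
  let pos : PySem.Dict Char (List Int) :=
    (PySem.List.enumerate cs).foldl (fun d p => d.modify p.2 [] (· ++ [p.1])) PySem.Dict.empty
  (PySem.List.pyRange (n - 1) 0 (-1)).foldl (fun lista x =>
    -- 'for y in pos[parola[x]]: if y >= x: break; append x; append y' — the break is takeWhile (y < x)
    ((pos.getD (PySem.List.pyGetD cs x ' ') []).takeWhile (fun y => decide (y < x))).foldl
      (fun lista y => lista ++ [x, y]) lista) []

-- ===== PRECONDITION & SPEC =====
def Spec_ritornaIndiciDuplicati (parola : String) (out : List Int) : Prop := out = ritornaIndiciDuplicati_alt parola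
instance (parola : String) (out : List Int) : Decidable (Spec_ritornaIndiciDuplicati parola out) := by unfold Spec_ritornaIndiciDuplicati; infer_instance

-- ===== CLAIM (what is proved, stated in full; the proofs are below) =====
def Claim_equal_ritornaIndiciDuplicati : Prop := ∀ (parola : String), Dom_ritornaIndiciDuplicati parola → Spec_ritornaIndiciDuplicati parola (ritornaIndiciDuplicati parola)

-- ===== LEMMAS AND PROOFS =====

-- B's per-character index list is the ascending filter of all positions.
theorem pv_pos_getD (cs : List Char) (c : Char) :
    ((PySem.List.enumerate cs).foldl (fun d p => d.modify p.2 [] (· ++ [p.1])) PySem.Dict.empty).getD c []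
      = (PySem.List.pyRange 0 (cs.length : Int) 1).filter
          (fun j => PySem.List.pyGetD cs j ' ' == c) := by
  rw [PySem.List.enumerate_eq_map_pyRange cs ' ']
  rw [show (List.map (fun j => (j, PySem.List.pyGetD cs j ' ')) (PySem.List.pyRange 0 (PySem.List.len cs) 1))
        = List.map (fun p => (p.2, p.1))
            (List.map (fun j => (PySem.List.pyGetD cs j ' ', j)) (PySem.List.pyRange 0 (PySem.List.len cs) 1))
      from by simp [List.map_map]]
  rw [List.foldl_map]
  have := PySem.Dict.getD_foldl_modify_append
      (List.map (fun j => (PySem.List.pyGetD cs j ' ', j)) (PySem.List.pyRange 0 (PySem.List.len cs) 1))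
      (PySem.Dict.empty : PySem.Dict Char (List Int)) c
  rw [this]
  simp [List.filter_map, List.map_map, PySem.List.len, Function.comp_def]

-- on a strictly increasing list, the inner break is the filter
theorem pv_takeWhile_lt (l : List Int) (x : Int) (h : l.Pairwise (· < ·)) :
    l.takeWhile (fun y => decide (y < x)) = l.filter (fun y => decide (y < x)) := by
  induction l with
  | nil => rfl
  | cons a t ih =>
    rcases List.pairwise_cons.1 h with ⟨ha, ht⟩
    by_cases hax : a < x
    · simp [hax, ih ht]
    · simp only [List.takeWhile_cons, List.filter_cons]
      rw [if_neg (by simp [hax]), if_neg (by simp [hax])]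
      symm
      rw [List.filter_eq_nil_iff]
      intro y hy h'
      exact absurd (of_decide_eq_true h') (by have := ha y hy; omega)

theorem pv_flatMap_if {α β : Type} (p : α → Bool) (f : α → List β) (l : List α) :
    l.flatMap (fun y => if p y then f y else []) = (l.filter p).flatMap f := by
  induction l with
  | nil => rfl
  | cons a t ih =>
    by_cases h : p a <;> simp [h, ih]

-- the two inner loops agree for every 0 < x ≤ n
theorem pv_inner (cs : List Char) (x : Int) (hx : 0 < x) (hn : x ≤ (cs.length : Int))
    (lista : List Int) :
    (PySem.List.pyRange 0 x 1).foldl (fun lista y =>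
        if PySem.List.pyGetD cs x ' ' == PySem.List.pyGetD cs y ' ' then lista ++ [x, y] else lista) lista
      = ((((PySem.List.enumerate cs).foldl (fun d p => d.modify p.2 [] (· ++ [p.1]))
            PySem.Dict.empty).getD (PySem.List.pyGetD cs x ' ') []).takeWhile
              (fun y => decide (y < x))).foldl (fun lista y => lista ++ [x, y]) lista := by
  rw [pv_pos_getD]
  rw [pv_takeWhile_lt _ _ ((PySem.List.pairwise_lt_pyRange_one 0 (cs.length : Int)).filter _)]
  rw [List.filter_filter]
  -- left side: turn the conditional append into a flatMap over the filtered prefix range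
  rw [PySem.List.foldl_congr_mem _ _
        (fun lista y => lista ++ (if PySem.List.pyGetD cs x ' ' == PySem.List.pyGetD cs y ' '
            then [x, y] else [])) lista
        (by intro acc y _; by_cases h : PySem.List.pyGetD cs x ' ' == PySem.List.pyGetD cs y ' ' <;> simp [h])]
  rw [PySem.List.foldl_append_eq_flatMap, PySem.List.foldl_append_eq_flatMap]
  rw [pv_flatMap_if]
  congr 1
  -- remaining: filter over range(0,x) = double filter over range(0,n)
  rw [PySem.List.pyRange_one_append 0 x (cs.length : Int) (by omega) hn, List.filter_append]
  have h2 : (PySem.List.pyRange x (cs.length : Int) 1).filter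
      (fun y => decide (y < x) && (PySem.List.pyGetD cs y ' ' == PySem.List.pyGetD cs x ' ')) = [] := by
    simp only [List.filter_eq_nil_iff]
    intro y hy h'
    have hm := PySem.List.mem_pyRange_one.1 hy
    have := of_decide_eq_true (Bool.and_elim_left h')
    omega
  rw [h2, List.append_nil]
  congr 1
  apply List.filter_congr
  intro y hy
  have := PySem.List.mem_pyRange_one.1 hy
  have hlt : decide (y < x) = true := by simp; omega
  simp only [hlt, Bool.true_and]
  by_cases h : PySem.List.pyGetD cs x ' ' = PySem.List.pyGetD cs y ' '
  · simp [h]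
  · simp [h, Ne.symm h]

-- ===== VERDICT (by name: the statement is the Claim_ definition above) =====
theorem ritornaIndiciDuplicati_spec : Claim_equal_ritornaIndiciDuplicati := by
  intro parola _
  unfold Spec_ritornaIndiciDuplicati ritornaIndiciDuplicati ritornaIndiciDuplicati_alt
  apply PySem.List.foldl_congr_mem
  intro acc x hx
  have hx' := PySem.List.mem_pyRange_neg_one.1 hx
  exact pv_inner parola.toList x hx'.1 (by omega) acc
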